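-- pv_equiv track=rewrite | github.com/Bjarturl/weaver | weaver.py | parse_word_groups
-- ===== SOURCE A (Python) =====
-- def parse_word_groups(value):
--     groups = []
--     words = []
--     for g in value.split(';'):
--         group = [w.strip() for w in g.split(',') if w.strip()]
--         if group:
--             groups.append(group)
--             words.extend(group)
--     return words, groups
-- ===== SOURCE B (Python) =====
-- def parse_word_groups(value):
--     groups = []
--     words = []
--     group = []
--     cur = ""   # current word: leading whitespace skipped, trailing whitespace parked in pend
--     pend = ""  # run of whitespace seen after the last word character
--     for ch in value + ";":
--         if ch == "," or ch == ";":
--             if cur: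
--                 group.append(cur)
--             cur = ""
--             pend = ""
--             if ch == ";":
--                 if group:
--                     groups.append(group)
--                     words.extend(group)
--                 group = []
--         elif ch in " \t\n\r\x0b\x0c":
--             if cur:
--                 pend += ch
--         else:
--             cur += pend + ch
--             pend = ""
--     return words, groups
-- ===== Notes on version B (the rewrite author's own statement) =====
-- stated objective: alternative
-- what changed: B replaces A's split-on-semicolon/split-on-comma/strip pipeline with a single character-level state machine: one pass over the input that builds each word in a buffer (skipping leading whitespace, parking trailing whitespace in a pending buffer) and emits words and groups when it meets a delimiter character, never calling split or strip.
import Mathlib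
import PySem

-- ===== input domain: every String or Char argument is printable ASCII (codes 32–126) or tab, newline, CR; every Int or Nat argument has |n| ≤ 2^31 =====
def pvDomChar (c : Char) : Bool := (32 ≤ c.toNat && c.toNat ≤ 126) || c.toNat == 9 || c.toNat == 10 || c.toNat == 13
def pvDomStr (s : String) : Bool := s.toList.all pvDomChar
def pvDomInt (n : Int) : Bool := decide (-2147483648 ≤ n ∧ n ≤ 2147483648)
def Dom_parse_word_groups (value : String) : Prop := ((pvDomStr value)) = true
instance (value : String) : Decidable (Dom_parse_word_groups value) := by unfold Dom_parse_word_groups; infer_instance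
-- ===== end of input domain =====

-- B replaces A's split/strip pipeline by a one-pass character-level state machine (objective: alternative).


-- ===== PORT A =====
-- A: split on ';', split each piece on ',', strip, filter; one loop appending to both accumulators
def parse_word_groups (value : String) : List String × List (List String) :=
  let st := ((PySem.Str.split? value ";").getD []).foldl
    (fun (st : List (List String) × List String) g =>
      let group := (((PySem.Str.split? g ",").getD []).map PySem.Str.strip).filter (fun w => w != "")
      if group ≠ [] then (st.1 ++ [group], st.2 ++ group) else st)
    ([], [])
  (st.2, st.1)

-- ===== PORT B =====
-- B: character-level state machine over value + ";" (python's `ch in " \t\n\r\x0b\x0c"` is the toNat test below)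
def pwgWS (c : Char) : Bool := c.toNat == 32 || (9 ≤ c.toNat && c.toNat ≤ 13)

def pwgStep (st : List (List String) × List String × List String × List Char × List Char) (ch : Char) :
    List (List String) × List String × List String × List Char × List Char :=
  match st with
  | (groups, words, group, cur, pend) =>
    if ch == ',' || ch == ';' then
      let group' := if cur.isEmpty then group else group ++ [String.ofList cur]
      if ch == ';' then
        if group'.isEmpty then (groups, words, [], [], [])
        else (groups ++ [group'], words ++ group', [], [], [])
      else (groups, words, group', [], [])
    else if pwgWS ch then
      if cur.isEmpty then (groups, words, group, cur, pend)
      else (groups, words, group, cur, pend ++ [ch])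
    else (groups, words, group, cur ++ pend ++ [ch], [])

def parse_word_groups_alt (value : String) : List String × List (List String) :=
  let st := (value.toList ++ [';']).foldl pwgStep ([], [], [], [], [])
  (st.2.1, st.1)

-- ===== PRECONDITION & SPEC =====
def Spec_parse_word_groups (value : String) (out : List String × List (List String)) : Prop := out = parse_word_groups_alt value
instance (value : String) (out : List String × List (List String)) : Decidable (Spec_parse_word_groups value out) := by unfold Spec_parse_word_groups; infer_instance

-- ===== CLAIM =====
def Claim_equal_parse_word_groups : Prop := ∀ (value : String), Dom_parse_word_groups value → Spec_parse_word_groups value (parse_word_groups value)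

-- ===== LEMMAS AND PROOFS =====

-- reference characterization both ports are proved equal to
def pwgSC (x : Char) : List Char → List Char × List (List Char)
  | [] => ([], [])
  | c :: cs =>
      let r := pwgSC x cs
      if c = x then ([], r.1 :: r.2) else (c :: r.1, r.2)

def pwgSCL (x : Char) (cs : List Char) : List (List Char) := (pwgSC x cs).1 :: (pwgSC x cs).2

def pwgStripL (l : List Char) : List Char := l.dropWhile pwgWS
def pwgStripR (l : List Char) : List Char := (l.reverse.dropWhile pwgWS).reverse
def pwgStrip (l : List Char) : List Char := pwgStripR (pwgStripL l)

def pwgEmitW (w : List Char) : List String := if w = [] then [] else [String.ofList w]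
def pwgEmitG (g : List String) : List (List String) := if g = [] then [] else [g]
def pwgFirstW (cur pend w : List Char) : List Char :=
  if cur = [] then pwgStrip w else pwgStripR (cur ++ pend ++ w)
def pwgRefWords (p : List Char) : List String :=
  ((pwgSCL ',' p).map (fun w => String.ofList (pwgStrip w))).filter (fun w => w != "")
def pwgWordsFrom (cur pend p : List Char) : List String :=
  pwgEmitW (pwgFirstW cur pend (pwgSC ',' p).1) ++
    (((pwgSC ',' p).2.map (fun w => String.ofList (pwgStrip w))).filter (fun w => w != ""))
def pwgRefGroups (cs : List Char) : List (List String) :=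
  ((pwgSCL ';' cs).map pwgRefWords).filter (fun g => g != [])
def pwgGroupsFrom (group : List String) (cur pend cs : List Char) : List (List String) :=
  pwgEmitG (group ++ pwgWordsFrom cur pend (pwgSC ';' cs).1) ++
    (((pwgSC ';' cs).2.map pwgRefWords).filter (fun g => g != []))

theorem pwg_filter_cons_w (w : List Char) (l : List String) :
    List.filter (fun w => w != "") (String.ofList w :: l) = pwgEmitW w ++ List.filter (fun w => w != "") l := by
  by_cases h : w = []
  · subst h; simp [pwgEmitW]
  · have : (String.ofList w != "") = true := by
      simp [bne, Ne, h]
    simp [pwgEmitW, this, h]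

theorem pwg_filter_cons_g (g : List String) (l : List (List String)) :
    List.filter (fun g => g != ([] : List String)) (g :: l) = pwgEmitG g ++ List.filter (fun g => g != ([] : List String)) l := by
  by_cases h : g = []
  · subst h; simp [pwgEmitG]
  · simp [pwgEmitG, h]

@[simp] theorem pwg_flatten_emitG (g : List String) : (pwgEmitG g).flatten = g := by
  by_cases h : g = [] <;> simp [pwgEmitG, h]

theorem pwg_words_nil (p : List Char) : pwgWordsFrom [] [] p = pwgRefWords p := by
  unfold pwgWordsFrom pwgRefWords pwgSCL pwgFirstW
  simp [List.map_cons, pwg_filter_cons_w, pwgEmitW]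

theorem pwg_groups_nil (cs : List Char) : pwgGroupsFrom [] [] [] cs = pwgRefGroups cs := by
  unfold pwgGroupsFrom pwgRefGroups pwgSCL
  simp [List.map_cons, pwg_filter_cons_g, pwg_words_nil]

-- pwgStripR facts
theorem pwg_stripR_append_ws (l pend : List Char) (hp : pend.all pwgWS = true) :
    pwgStripR (l ++ pend) = pwgStripR l := by
  unfold pwgStripR
  have hnil : pend.reverse.dropWhile pwgWS = [] := by
    rw [List.dropWhile_eq_nil_iff]
    intro x hx; exact (List.all_eq_true.mp hp) x (List.mem_reverse.mp hx)
  rw [List.reverse_append, List.dropWhile_append, hnil]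
  simp

theorem pwg_stripR_of_last (cur : List Char) (hl : ∀ c ∈ cur.getLast?, pwgWS c = false) :
    pwgStripR cur = cur := by
  unfold pwgStripR
  cases h : cur.reverse with
  | nil => simp [List.reverse_eq_nil_iff.mp h]
  | cons c t =>
    have hc : cur.getLast? = some c := by
      rw [← List.head?_reverse, h]; rfl
    have : pwgWS c = false := hl c (by simp [hc])
    rw [List.dropWhile_cons, this]
    simp [← h]

theorem pwg_curword (cur pend : List Char) (hp : pend.all pwgWS = true)
    (hl : ∀ c ∈ cur.getLast?, pwgWS c = false) :
    pwgFirstW cur pend [] = cur := by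
  unfold pwgFirstW
  by_cases h : cur = []
  · simp [h, pwgStrip, pwgStripL, pwgStripR]
  · rw [if_neg h]
    rw [List.append_nil, pwg_stripR_append_ws cur pend hp, pwg_stripR_of_last cur hl]

theorem pwg_firstW_nil (w : List Char) : pwgFirstW [] [] w = pwgStrip w := by
  simp [pwgFirstW]

-- step lemmas for pwgGroupsFrom
theorem pwg_gf_semi (group : List String) (cur pend cs : List Char)
    (hcw : pwgFirstW cur pend [] = cur) :
    pwgGroupsFrom group cur pend (';' :: cs) = pwgEmitG (group ++ pwgEmitW cur) ++ pwgRefGroups cs := by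
  unfold pwgGroupsFrom pwgWordsFrom pwgRefGroups pwgSCL
  simp [pwgSC, hcw, pwg_filter_cons_g]

theorem pwg_gf_comma (group : List String) (cur pend cs : List Char)
    (hcw : pwgFirstW cur pend [] = cur) :
    pwgGroupsFrom group cur pend (',' :: cs) = pwgGroupsFrom (group ++ pwgEmitW cur) [] [] cs := by
  unfold pwgGroupsFrom pwgWordsFrom
  simp [pwgSC, hcw, pwg_filter_cons_w, pwg_firstW_nil, List.append_assoc]

theorem pwg_gf_ws_nil (group : List String) (c : Char) (cs : List Char)
    (hsemi : c ≠ ';') (hcomma : c ≠ ',') (hws : pwgWS c = true) :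
    pwgGroupsFrom group [] [] (c :: cs) = pwgGroupsFrom group [] [] cs := by
  unfold pwgGroupsFrom pwgWordsFrom
  simp [pwgSC, hsemi, hcomma, pwgFirstW, pwgStrip, pwgStripL, hws]

theorem pwg_gf_ws (group : List String) (c : Char) (cur pend cs : List Char)
    (hsemi : c ≠ ';') (hcomma : c ≠ ',') (hcur : cur ≠ []) :
    pwgGroupsFrom group cur pend (c :: cs) = pwgGroupsFrom group cur (pend ++ [c]) cs := by
  unfold pwgGroupsFrom pwgWordsFrom
  simp [pwgSC, hsemi, hcomma, pwgFirstW, hcur, List.append_assoc]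

theorem pwg_gf_char (group : List String) (c : Char) (cur pend cs : List Char)
    (hsemi : c ≠ ';') (hcomma : c ≠ ',') (hws : pwgWS c = false) (hc : cur = [] → pend = []) :
    pwgGroupsFrom group cur pend (c :: cs) = pwgGroupsFrom group (cur ++ pend ++ [c]) [] cs := by
  unfold pwgGroupsFrom pwgWordsFrom
  by_cases h : cur = []
  · have hpe : pend = [] := hc h
    subst h; subst hpe
    simp [pwgSC, hsemi, hcomma, pwgFirstW, pwgStrip, pwgStripL, hws]
  · simp [pwgSC, hsemi, hcomma, pwgFirstW, h, List.append_assoc]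

-- ===== B = reference =====
theorem pwg_bmain (cs : List Char) : ∀ (groups : List (List String)) (words group : List String)
    (cur pend : List Char), pend.all pwgWS = true → (cur = [] → pend = []) →
    (∀ c ∈ cur.getLast?, pwgWS c = false) →
    (cs ++ [';']).foldl pwgStep (groups, words, group, cur, pend) =
      (groups ++ pwgGroupsFrom group cur pend cs,
       words ++ (pwgGroupsFrom group cur pend cs).flatten, [], [], []) := by
  induction cs with
  | nil =>
    intro groups words group cur pend hp hc hl
    have hcw := pwg_curword cur pend hp hl
    simp only [List.nil_append, List.foldl_cons, List.foldl_nil]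
    unfold pwgGroupsFrom pwgWordsFrom pwgStep
    simp only [pwgSC, hcw]
    by_cases h : cur = []
    · by_cases hg : group = [] <;>
        simp [h, hg, pwgEmitW, pwgEmitG, List.isEmpty_iff, pwgStrip, pwgStripL, pwgStripR]
    · have hg' : group ++ [String.ofList cur] ≠ [] := by simp
      simp [h, hg', pwgEmitW, pwgEmitG, List.isEmpty_iff]
  | cons c cs ih =>
    intro groups words group cur pend hp hc hl
    have hcw := pwg_curword cur pend hp hl
    rw [List.cons_append, List.foldl_cons]
    by_cases hsemi : c = ';'
    · subst hsemi
      have hstep : pwgStep (groups, words, group, cur, pend) ';' =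
          (groups ++ pwgEmitG (group ++ pwgEmitW cur),
           words ++ (pwgEmitG (group ++ pwgEmitW cur)).flatten, [], [], []) := by
        unfold pwgStep
        by_cases h : cur = []
        · by_cases hg : group = [] <;>
            simp [h, hg, pwgEmitW, pwgEmitG, List.isEmpty_iff]
        · have hg' : group ++ [String.ofList cur] ≠ [] := by simp
          simp [h, hg', pwgEmitW, pwgEmitG, List.isEmpty_iff]
      rw [hstep, ih _ _ _ _ _ (by simp) (fun _ => rfl) (by simp), pwg_groups_nil,
        pwg_gf_semi group cur pend cs hcw]
      simp [List.append_assoc, List.flatten_append]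
    · by_cases hcomma : c = ','
      · subst hcomma
        have hstep : pwgStep (groups, words, group, cur, pend) ',' =
            (groups, words, group ++ pwgEmitW cur, [], []) := by
          unfold pwgStep
          by_cases h : cur = [] <;> simp [h, pwgEmitW, List.isEmpty_iff]
        rw [hstep, ih _ _ _ _ _ (by simp) (fun _ => rfl) (by simp),
          pwg_gf_comma group cur pend cs hcw]
      · have hne : (c == ',' || c == ';') = false := by
          simp [hsemi, hcomma]
        by_cases hws : pwgWS c = true
        · by_cases h : cur = []
          · have hpe : pend = [] := hc h
            subst h; subst hpe
            have hstep : pwgStep (groups, words, group, [], []) c = (groups, words, group, [], []) := by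
              unfold pwgStep; simp [hne, hws]
            rw [hstep, ih _ _ _ _ _ (by simp) (fun _ => rfl) (by simp),
              pwg_gf_ws_nil group c cs hsemi hcomma hws]
          · have hstep : pwgStep (groups, words, group, cur, pend) c =
                (groups, words, group, cur, pend ++ [c]) := by
              unfold pwgStep; simp [hne, hws, List.isEmpty_iff, h]
            rw [hstep, ih _ _ _ _ _ (by simp [List.all_eq_true] at hp ⊢; exact ⟨hp, hws⟩)
              (fun hcc => absurd hcc h) hl,
              pwg_gf_ws group c cur pend cs hsemi hcomma h]
        · have hws' : pwgWS c = false := by simpa using hws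
          have hstep : pwgStep (groups, words, group, cur, pend) c =
              (groups, words, group, cur ++ pend ++ [c], []) := by
            unfold pwgStep; simp [hne, hws']
          have hl' : ∀ d ∈ (cur ++ pend ++ [c]).getLast?, pwgWS d = false := by
            intro d hd
            simp [List.getLast?_append] at hd
            subst hd; exact hws'
          rw [hstep, ih _ _ _ _ _ (by simp) (by simp) hl',
            pwg_gf_char group c cur pend cs hsemi hcomma hws' hc]

theorem pwg_b_eq_ref (value : String) :
    parse_word_groups_alt value = ((pwgRefGroups value.toList).flatten, pwgRefGroups value.toList) := by
  unfold parse_word_groups_alt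
  rw [pwg_bmain value.toList [] [] [] [] [] (by simp) (fun _ => rfl) (by simp)]
  rw [pwg_groups_nil]
  simp

-- ===== A = reference =====
theorem pwg_foldl (l : List String) (gs : List (List String)) (ws : List String) :
    l.foldl
      (fun (st : List (List String) × List String) g =>
        let group := (((PySem.Str.split? g ",").getD []).map PySem.Str.strip).filter (fun w => w != "")
        if group ≠ [] then (st.1 ++ [group], st.2 ++ group) else st)
      (gs, ws)
    = (gs ++ (l.map (fun piece => (((PySem.Str.split? piece ",").getD []).map PySem.Str.strip).filter (fun w => w != ""))).filter (fun g => g != []),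
       ws ++ ((l.map (fun piece => (((PySem.Str.split? piece ",").getD []).map PySem.Str.strip).filter (fun w => w != ""))).filter (fun g => g != [])).flatMap id) := by
  induction l generalizing gs ws with
  | nil => simp
  | cons h t ih =>
    rw [List.foldl_cons]
    by_cases hne : (((PySem.Str.split? h ",").getD []).map PySem.Str.strip).filter (fun w => w != "") = []
    · rw [if_neg (by simpa using hne), ih]
      simp [hne]
    · rw [if_pos hne, ih]
      simp [hne, List.append_assoc]

-- splitOn with a single-character separator is pwgSCL
theorem pwg_go_single (x : Char) (fuel : Nat) : ∀ (l cur : List Char) (acc : List (List Char)),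
    l.length < fuel →
    PySem.Chars.splitOn.go [x] fuel l cur acc =
      acc.reverse ++ (cur.reverse ++ (pwgSC x l).1) :: (pwgSC x l).2 := by
  induction fuel with
  | zero => intro l cur acc h; omega
  | succ n ih =>
    intro l cur acc h
    cases l with
    | nil =>
      rw [PySem.Chars.splitOn.go.eq_def]
      simp [pwgSC]
    | cons c rest =>
      rw [PySem.Chars.splitOn.go.eq_def]
      simp only []
      have hpre : [x].isPrefixOf (c :: rest) = (x == c) := by
        simp [List.isPrefixOf]
      by_cases hx : c = x
      · subst hx
        simp only [List.isPrefixOf, Bool.and_true, beq_self_eq_true, if_pos, List.length_cons,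
          List.length_nil, List.drop_succ_cons, List.drop_zero]
        rw [ih rest [] (cur.reverse :: acc) (by simpa using Nat.lt_of_succ_lt_succ h)]
        simp [pwgSC]
      · have hpre' : ([x].isPrefixOf (c :: rest)) = false := by
          simp [List.isPrefixOf]; exact fun hh => hx hh.symm
        rw [hpre']
        simp only [Bool.false_eq_true, if_false]
        rw [ih rest (c :: cur) acc (by simpa using Nat.lt_of_succ_lt_succ h)]
        simp [pwgSC, hx]

theorem pwg_splitOn_single (x : Char) (l : List Char) :
    PySem.Chars.splitOn l [x] = pwgSCL x l := by
  unfold PySem.Chars.splitOn pwgSCL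
  rw [pwg_go_single x (l.length + 1) l [] [] (by omega)]
  simp

-- membership: every piece of pwgSCL is made of characters of the input
theorem pwg_sc_mem_aux (x : Char) (l : List Char) :
    (∀ c ∈ (pwgSC x l).1, c ∈ l) ∧ (∀ p ∈ (pwgSC x l).2, ∀ c ∈ p, c ∈ l) := by
  induction l with
  | nil => simp [pwgSC]
  | cons a l ih =>
    by_cases hx : a = x
    · simp only [pwgSC, if_pos hx]
      refine ⟨by simp, ?_⟩
      intro p hp c hcp
      rcases List.mem_cons.mp hp with h | h
      · subst h; exact List.mem_cons_of_mem _ (ih.1 c hcp)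
      · exact List.mem_cons_of_mem _ (ih.2 p h c hcp)
    · simp only [pwgSC, if_neg hx]
      refine ⟨?_, ?_⟩
      · intro c hc
        rcases List.mem_cons.mp hc with h | h
        · simp [h]
        · exact List.mem_cons_of_mem _ (ih.1 c h)
      · intro p hp c hcp
        exact List.mem_cons_of_mem _ (ih.2 p hp c hcp)

theorem pwg_sc_mem (x : Char) (l : List Char) :
    ∀ p ∈ pwgSCL x l, ∀ c ∈ p, c ∈ l := by
  intro p hp c hcp
  unfold pwgSCL at hp
  rcases List.mem_cons.mp hp with h | h
  · subst h; exact (pwg_sc_mem_aux x l).1 c hcp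
  · exact (pwg_sc_mem_aux x l).2 p h c hcp

-- isspace agrees with pwgWS on domain characters
theorem pwg_ws_eq (c : Char) (h : pvDomChar c = true) : PySem.Chars.isspace c = pwgWS c := by
  have h' : (32 ≤ c.toNat ∧ c.toNat ≤ 126) ∨ c.toNat = 9 ∨ c.toNat = 10 ∨ c.toNat = 13 := by
    have := by simpa [pvDomChar, Bool.or_eq_true, Bool.and_eq_true, decide_eq_true_eq] using h
    tauto
  rw [Bool.eq_iff_iff]
  unfold PySem.Chars.isspace pwgWS
  simp only [Bool.or_eq_true, Bool.and_eq_true, decide_eq_true_eq, beq_iff_eq]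
  omega

theorem pwg_dropWhile_dom (l : List Char) (h : ∀ c ∈ l, pvDomChar c = true) :
    l.dropWhile PySem.Chars.isspace = l.dropWhile pwgWS := by
  induction l with
  | nil => rfl
  | cons a l ih =>
    rw [List.dropWhile_cons, List.dropWhile_cons, pwg_ws_eq a (h a (by simp))]
    by_cases hws : pwgWS a = true
    · rw [hws]; rw [if_pos rfl]
      exact ih (fun c hc => h c (by simp [hc]))
    · simp at hws; rw [hws]; simp

theorem pwg_strip_dom (l : List Char) (h : ∀ c ∈ l, pvDomChar c = true) :
    PySem.Chars.strip l = pwgStrip l := by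
  unfold PySem.Chars.strip PySem.Chars.lstrip PySem.Chars.rstrip pwgStrip pwgStripL pwgStripR
  rw [pwg_dropWhile_dom l h]
  congr 1
  apply pwg_dropWhile_dom
  intro c hc
  exact h c ((List.dropWhile_sublist _).subset (List.mem_reverse.mp hc))

theorem pwg_a_eq_ref (value : String) (hdom : pvDomStr value = true) :
    parse_word_groups value = ((pwgRefGroups value.toList).flatten, pwgRefGroups value.toList) := by
  unfold parse_word_groups
  rw [pwg_foldl]
  have hsplit : (PySem.Str.split? value ";").getD [] =
      (pwgSCL ';' value.toList).map String.ofList := by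
    unfold PySem.Str.split? PySem.Chars.split?
    rw [show (";".toList) = [';'] from rfl]
    simp [pwg_splitOn_single]
  rw [hsplit]
  have hpiece : ∀ p ∈ pwgSCL ';' value.toList,
      (((PySem.Str.split? (String.ofList p) ",").getD []).map PySem.Str.strip).filter (fun w => w != "") =
        pwgRefWords p := by
    intro p hp
    have hsplit2 : (PySem.Str.split? (String.ofList p) ",").getD [] =
        (pwgSCL ',' p).map String.ofList := by
      unfold PySem.Str.split? PySem.Chars.split?
      rw [show (",".toList) = [','] from rfl]
      simp [pwg_splitOn_single]
    rw [hsplit2]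
    unfold pwgRefWords
    congr 1
    rw [List.map_map]
    apply List.map_congr_left
    intro w hw
    have hwdom : ∀ c ∈ w, pvDomChar c = true := by
      intro c hc
      have hcval : c ∈ value.toList := pwg_sc_mem ';' value.toList p hp c (pwg_sc_mem ',' p w hw c hc)
      exact (List.all_eq_true.mp (by simpa [pvDomStr] using hdom)) c hcval
    show PySem.Str.strip (String.ofList w) = String.ofList (pwgStrip w)
    unfold PySem.Str.strip
    rw [String.toList_ofList, pwg_strip_dom w hwdom]
  have hmap : (pwgSCL ';' value.toList).map
      ((fun piece => (((PySem.Str.split? piece ",").getD []).map PySem.Str.strip).filter (fun w => w != "")) ∘ String.ofList)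
      = (pwgSCL ';' value.toList).map pwgRefWords := by
    apply List.map_congr_left
    intro p hp
    simpa using hpiece p hp
  rw [List.map_map, hmap]
  unfold pwgRefGroups
  simp [List.flatMap_id]

-- ===== VERDICT =====
theorem parse_word_groups_spec : Claim_equal_parse_word_groups := by
  intro value hdom
  unfold Spec_parse_word_groups
  rw [pwg_a_eq_ref value hdom, pwg_b_eq_ref value]
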